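-- pv_equiv track=rewrite | github.com/chaubold/hytra | hytra/core/jsongraph.py | getDivisionsPerTimestep
-- ===== SOURCE A (Python) =====
-- def getDivisionsPerTimestep(divisions, linksPerTimestep, timesteps, withDivisions):
--     ''' returns divisionsPerTimestep = { "<timestep>": {<parentIdx>: [<childIdx>, <childIdx>], ...}, "<timestep>": {...}, ... } '''
--     if withDivisions:
--         # find children of divisions by looking for the active links
--         divisionsPerTimestep = {}
--         for t in timesteps:
--             divisionsPerTimestep[t] = {}
--             for div_timestep, div_idx in divisions:
--                 if div_timestep == int(t) - 1:
--                     # we have an active division of the mother cell "div_idx" in the previous frame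
--                     children = [b for a,b in linksPerTimestep[t] if a == div_idx]
--                     assert(len(children) == 2)
--                     divisionsPerTimestep[t][div_idx] = children
--     else:
--         divisionsPerTimestep = dict([(t,{}) for t in timesteps])
--
--     return divisionsPerTimestep
-- ===== SOURCE B (Python) =====
-- def getDivisionsPerTimestep(divisions, linksPerTimestep, timesteps, withDivisions):
--     ''' same mapping, but divisions and links are pre-indexed into dicts: one pass over each input '''
--     result = {t: {} for t in timesteps}
--     if withDivisions and divisions:
--         parentsByTime = {}
--         for div_timestep, div_idx in divisions:
--             parentsByTime.setdefault(div_timestep, []).append(div_idx)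
--         for t in timesteps:
--             parents = parentsByTime.get(int(t) - 1, [])
--             if parents:
--                 childrenBySource = {}
--                 for a, b in linksPerTimestep[t]:
--                     childrenBySource.setdefault(a, []).append(b)
--                 inner = {}
--                 for div_idx in parents:
--                     children = childrenBySource.get(div_idx, [])
--                     assert(len(children) == 2)
--                     inner[div_idx] = children
--                 result[t] = inner
--     return result
-- ===== Notes on version B (the rewrite author's own statement) =====
-- stated objective: alternative
-- what changed: B builds a timestep->parents index of divisions once and, per needed timestep, a source->children index of links, replacing A's rescan of all divisions for every timestep and of all links for every matching division (measured ~1.4x at the largest timed size, below the 1.5x bar, so no speed claim).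
import Mathlib
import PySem

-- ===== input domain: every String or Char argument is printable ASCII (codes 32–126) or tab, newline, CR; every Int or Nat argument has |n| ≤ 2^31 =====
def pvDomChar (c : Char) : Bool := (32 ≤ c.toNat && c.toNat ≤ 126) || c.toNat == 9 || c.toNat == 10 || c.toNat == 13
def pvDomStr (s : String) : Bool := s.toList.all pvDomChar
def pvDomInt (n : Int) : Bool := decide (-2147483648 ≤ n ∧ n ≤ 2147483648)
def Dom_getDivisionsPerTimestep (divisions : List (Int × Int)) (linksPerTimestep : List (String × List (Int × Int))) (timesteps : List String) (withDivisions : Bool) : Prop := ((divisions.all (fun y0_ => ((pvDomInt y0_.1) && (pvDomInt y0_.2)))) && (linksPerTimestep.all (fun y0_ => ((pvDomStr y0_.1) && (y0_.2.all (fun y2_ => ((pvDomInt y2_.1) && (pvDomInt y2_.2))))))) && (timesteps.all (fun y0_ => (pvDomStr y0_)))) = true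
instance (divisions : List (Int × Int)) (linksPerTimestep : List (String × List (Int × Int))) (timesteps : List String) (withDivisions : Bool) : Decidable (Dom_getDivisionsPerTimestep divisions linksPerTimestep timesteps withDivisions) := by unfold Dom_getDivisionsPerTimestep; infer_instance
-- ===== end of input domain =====

-- B pre-indexes divisions by timestep and links by source node into dicts (one pass over each input) instead of A's
-- rescan of all divisions per timestep and of all links per matching division; same return value on Pre_.

-- shared helper: 'linksPerTimestep[t]' — first-match lookup in the association list (KeyError = none, totalised with []; Pre_ guarantees the key exists whenever it is reached)
def pyLinksAt (linksPerTimestep : List (String × List (Int × Int))) (t : String) : List (Int × Int) :=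
  ((linksPerTimestep.find? (fun q => q.1 == t)).map (fun q => q.2)).getD []

-- ===== PORT A =====
-- literal port of A: outer loop over timesteps, inner rescan of all divisions, list comprehension over links.
-- 'int(t)' is totalised with getD 0 (Pre_ guarantees it parses whenever divisions ≠ []); the 'assert' is a raise,
-- excluded by Pre_, and does not change the returned value.
def getDivisionsPerTimestep (divisions : List (Int × Int)) (linksPerTimestep : List (String × List (Int × Int))) (timesteps : List String) (withDivisions : Bool) : List (String × List (Int × List Int)) :=
  if withDivisions then
    (timesteps.foldl
      (fun (acc : PySem.Dict String (PySem.Dict Int (List Int))) t =>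
        divisions.foldl
          (fun acc2 p =>
            if p.1 == (PySem.Int.ofStr? t).getD 0 - 1 then
              acc2.modify t PySem.Dict.empty
                (fun inner => inner.insert p.2 (((pyLinksAt linksPerTimestep t).filter (fun q => q.1 == p.2)).map (fun q => q.2)))
            else acc2)
          (acc.insert t PySem.Dict.empty))
      PySem.Dict.empty).items.map (fun p => (p.1, p.2.items))
  else
    (timesteps.foldl (fun (acc : PySem.Dict String (PySem.Dict Int (List Int))) t => acc.insert t PySem.Dict.empty) PySem.Dict.empty).items.map (fun p => (p.1, p.2.items))

-- ===== PORT B =====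
-- literal port of Source B: result initialised to {t: {} for t in timesteps}; divisions grouped by timestep once,
-- links grouped by source once per needed timestep; one pass over each.
def getDivisionsPerTimestep_alt (divisions : List (Int × Int)) (linksPerTimestep : List (String × List (Int × Int))) (timesteps : List String) (withDivisions : Bool) : List (String × List (Int × List Int)) :=
  let result := timesteps.foldl (fun (acc : PySem.Dict String (PySem.Dict Int (List Int))) t => acc.insert t PySem.Dict.empty) PySem.Dict.empty
  let result :=
    if withDivisions && !divisions.isEmpty then
      let parentsByTime := divisions.foldl (fun (d : PySem.Dict Int (List Int)) p => d.modify p.1 [] (fun l => l ++ [p.2])) PySem.Dict.empty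
      timesteps.foldl
        (fun acc t =>
          let parents := parentsByTime.getD ((PySem.Int.ofStr? t).getD 0 - 1) []
          if parents.isEmpty then acc
          else
            let childrenBySource := (pyLinksAt linksPerTimestep t).foldl (fun (d : PySem.Dict Int (List Int)) q => d.modify q.1 [] (fun l => l ++ [q.2])) PySem.Dict.empty
            acc.insert t (parents.foldl (fun (inner : PySem.Dict Int (List Int)) di => inner.insert di (childrenBySource.getD di [])) PySem.Dict.empty))
        result
    else result
  result.items.map (fun p => (p.1, p.2.items))

-- ===== PRECONDITION & SPEC =====
-- Pre_ excludes exactly the inputs where the Python A raises: with divisions present and withDivisions set, every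
-- timestep string must parse as an int (else ValueError), and for every division matching a timestep, that timestep
-- must be a key of linksPerTimestep (else KeyError) and the matching links must number exactly 2 (else AssertionError).
def Pre_getDivisionsPerTimestep (divisions : List (Int × Int)) (linksPerTimestep : List (String × List (Int × Int))) (timesteps : List String) (withDivisions : Bool) : Prop :=
  withDivisions = true → divisions ≠ [] → ∀ t ∈ timesteps,
    (PySem.Int.ofStr? t).isSome = true ∧
    ∀ p ∈ divisions, p.1 = (PySem.Int.ofStr? t).getD 0 - 1 →
      ((linksPerTimestep.map (fun q => q.1)).contains t = true ∧
       ((pyLinksAt linksPerTimestep t).filter (fun q => q.1 == p.2)).length = 2)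
instance (divisions : List (Int × Int)) (linksPerTimestep : List (String × List (Int × Int))) (timesteps : List String) (withDivisions : Bool) : Decidable (Pre_getDivisionsPerTimestep divisions linksPerTimestep timesteps withDivisions) := by unfold Pre_getDivisionsPerTimestep; infer_instance

def pvWitness_getDivisionsPerTimestep : (List (Int × Int)) × (List (String × List (Int × Int))) × List String × Bool :=
  ([(0, 5)], [("1", [(5, 1), (5, 2)])], ["1"], true)

def Spec_getDivisionsPerTimestep (divisions : List (Int × Int)) (linksPerTimestep : List (String × List (Int × Int))) (timesteps : List String) (withDivisions : Bool) (out : List (String × List (Int × List Int))) : Prop := out = getDivisionsPerTimestep_alt divisions linksPerTimestep timesteps withDivisions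
instance (divisions : List (Int × Int)) (linksPerTimestep : List (String × List (Int × Int))) (timesteps : List String) (withDivisions : Bool) (out : List (String × List (Int × List Int))) : Decidable (Spec_getDivisionsPerTimestep divisions linksPerTimestep timesteps withDivisions out) := by unfold Spec_getDivisionsPerTimestep; infer_instance

-- ===== CLAIM (what is proved, stated in full; the proofs are below) =====
def Claim_equal_getDivisionsPerTimestep : Prop := ∀ (divisions : List (Int × Int)) (linksPerTimestep : List (String × List (Int × Int))) (timesteps : List String) (withDivisions : Bool), Dom_getDivisionsPerTimestep divisions linksPerTimestep timesteps withDivisions → Pre_getDivisionsPerTimestep divisions linksPerTimestep timesteps withDivisions → Spec_getDivisionsPerTimestep divisions linksPerTimestep timesteps withDivisions (getDivisionsPerTimestep divisions linksPerTimestep timesteps withDivisions)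

-- ===== LEMMAS AND PROOFS =====

-- A's inner division loop, which repeatedly 'modify's the entry just inserted at key t, equals inserting at t the
-- dict built by folding the divisions over the inner dict alone.
theorem pvStepA_eq (l : List (Int × Int)) (c : Int × Int → Bool) (ch : Int → List Int)
    (acc : PySem.Dict String (PySem.Dict Int (List Int))) (t : String) (v0 : PySem.Dict Int (List Int)) :
    l.foldl (fun a p => if c p then a.modify t PySem.Dict.empty (fun inner => inner.insert p.2 (ch p.2)) else a) (acc.insert t v0)
      = acc.insert t (l.foldl (fun inner p => if c p then inner.insert p.2 (ch p.2) else inner) v0) := by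
  induction l generalizing v0 with
  | nil => simp
  | cons p ps ih =>
    simp only [List.foldl_cons]
    by_cases h : c p
    · simp only [h, if_true]
      rw [PySem.Dict.modify, PySem.Dict.getD_insert, if_pos rfl, PySem.Dict.insert_insert_self, ih]
    · simp [h, ih]

theorem pvGet?_foldl_insert (I : String → PySem.Dict Int (List Int)) (ts : List String)
    (d : PySem.Dict String (PySem.Dict Int (List Int))) (k : String) :
    (ts.foldl (fun a t => a.insert t (I t)) d).get? k = if k ∈ ts then some (I k) else d.get? k := by
  induction ts generalizing d with
  | nil => simp
  | cons t rest ih =>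
    simp only [List.foldl_cons, ih, PySem.Dict.get?_insert, List.mem_cons]
    by_cases hr : k ∈ rest
    · simp [hr]
    · by_cases hk : k = t <;> simp [hr, hk]

theorem pvSet_update_of_subset (xs : List String) (s : PySem.Set String) (h : ∀ x ∈ xs, x ∈ s) :
    PySem.Set.update s xs = s := by
  induction xs generalizing s with
  | nil => rfl
  | cons x xs ih =>
    have hx : x ∈ s := h x (List.mem_cons_self)
    have : PySem.Set.add s x = s := by
      simp [PySem.Set.add, PySem.Set.contains, hx]
    show List.foldl PySem.Set.add (PySem.Set.add s x) xs = s
    rw [this]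
    exact ih s (fun y hy => h y (List.mem_cons_of_mem _ hy))

-- second pass over the same timesteps list, starting from the all-empty first pass, collapses to a single pass
theorem pvTwoPass (I : String → PySem.Dict Int (List Int)) (P : String → Bool)
    (h : ∀ t, P t = false → I t = PySem.Dict.empty) (ts : List String) :
    ts.foldl (fun a t => if P t then a.insert t (I t) else a)
        (ts.foldl (fun (a : PySem.Dict String (PySem.Dict Int (List Int))) t => a.insert t PySem.Dict.empty) PySem.Dict.empty)
      = ts.foldl (fun a t => a.insert t (I t)) PySem.Dict.empty := by
  have hfilter : (ts.filter P).foldl (fun (a : PySem.Dict String (PySem.Dict Int (List Int))) t => a.insert t (I t))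
      (ts.foldl (fun (a : PySem.Dict String (PySem.Dict Int (List Int))) t => a.insert t PySem.Dict.empty) PySem.Dict.empty)
      = ts.foldl (fun a t => if P t then a.insert t (I t) else a)
        (ts.foldl (fun (a : PySem.Dict String (PySem.Dict Int (List Int))) t => a.insert t PySem.Dict.empty) PySem.Dict.empty) := List.foldl_filter
  rw [← hfilter]
  have hkeysBase : (ts.foldl (fun (a : PySem.Dict String (PySem.Dict Int (List Int))) t => a.insert t PySem.Dict.empty) PySem.Dict.empty).keys = PySem.Set.ofList ts := by
    rw [PySem.Dict.keys_foldl_insert (f := fun _ _ => PySem.Dict.empty), PySem.Dict.keys_empty]; rfl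
  have hkeysL : ((ts.filter P).foldl (fun a t => a.insert t (I t))
      (ts.foldl (fun (a : PySem.Dict String (PySem.Dict Int (List Int))) t => a.insert t PySem.Dict.empty) PySem.Dict.empty)).keys = PySem.Set.ofList ts := by
    rw [PySem.Dict.keys_foldl_insert (f := fun _ t => I t), hkeysBase]
    exact pvSet_update_of_subset _ _ (fun x hx => (PySem.Set.mem_ofList ts x).2 (List.mem_of_mem_filter hx))
  have hkeysR : ((ts.foldl (fun a t => a.insert t (I t)) PySem.Dict.empty)).keys = PySem.Set.ofList ts := by
    rw [PySem.Dict.keys_foldl_insert (f := fun _ t => I t), PySem.Dict.keys_empty]; rfl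
  apply PySem.Dict.ext
  rw [PySem.Dict.items_eq_map_keys _ (by rw [hkeysL]; exact PySem.Set.nodup_ofList ts) PySem.Dict.empty,
      PySem.Dict.items_eq_map_keys _ (by rw [hkeysR]; exact PySem.Set.nodup_ofList ts) PySem.Dict.empty,
      hkeysL, hkeysR]
  apply List.map_congr_left
  intro k hk
  have hkts : k ∈ ts := (PySem.Set.mem_ofList ts k).1 hk
  simp only [PySem.Dict.getD_eq_get?_getD, pvGet?_foldl_insert, List.mem_filter]
  by_cases hp : P k = true
  · simp [hkts, hp]
  · have hpf : P k = false := by simpa using hp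
    simp [hkts, hp, h k hpf]

-- ===== VERDICT (by name: the statement is the Claim_ definition above) =====
theorem getDivisionsPerTimestep_spec : Claim_equal_getDivisionsPerTimestep := by
  intro divisions linksPerTimestep timesteps withDivisions _ _
  unfold Spec_getDivisionsPerTimestep getDivisionsPerTimestep getDivisionsPerTimestep_alt
  cases withDivisions with
  | false => simp
  | true =>
    simp only [Bool.true_and]
    -- name the per-timestep data
    set ch : String → Int → List Int := fun t di => ((pyLinksAt linksPerTimestep t).filter (fun q => q.1 == di)).map (fun q => q.2) with hch
    set I : String → PySem.Dict Int (List Int) := fun t => divisions.foldl (fun inner p => if p.1 == (PySem.Int.ofStr? t).getD 0 - 1 then inner.insert p.2 (ch t p.2) else inner) PySem.Dict.empty with hI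
    have hA : timesteps.foldl
        (fun (acc : PySem.Dict String (PySem.Dict Int (List Int))) t =>
          divisions.foldl (fun acc2 p => if p.1 == (PySem.Int.ofStr? t).getD 0 - 1 then
              acc2.modify t PySem.Dict.empty (fun inner => inner.insert p.2 (ch t p.2)) else acc2)
            (acc.insert t PySem.Dict.empty))
        PySem.Dict.empty
        = timesteps.foldl (fun a t => a.insert t (I t)) PySem.Dict.empty := by
      congr 1
      funext acc t
      exact pvStepA_eq divisions (fun p => p.1 == (PySem.Int.ofStr? t).getD 0 - 1) (ch t) acc t PySem.Dict.empty
    rw [hA]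
    by_cases hdiv : divisions.isEmpty
    · have hd : divisions = [] := List.isEmpty_iff.1 hdiv
      subst hd
      simp [hI]
    · simp only [hdiv, Bool.not_false, if_pos]
      -- B's grouped data
      set parents : String → List Int := fun t => ((divisions.foldl (fun (d : PySem.Dict Int (List Int)) p => d.modify p.1 [] (fun l => l ++ [p.2])) PySem.Dict.empty).getD ((PySem.Int.ofStr? t).getD 0 - 1) []) with hparents
      have hparents_eq : ∀ t, parents t = (divisions.filter (fun p => p.1 == (PySem.Int.ofStr? t).getD 0 - 1)).map (fun p => p.2) := by
        intro t
        rw [hparents]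
        simp [PySem.Dict.getD_foldl_modify_append]
      have hcbs : ∀ t di, ((pyLinksAt linksPerTimestep t).foldl (fun (d : PySem.Dict Int (List Int)) q => d.modify q.1 [] (fun l => l ++ [q.2])) PySem.Dict.empty).getD di [] = ch t di := by
        intro t di
        simp [PySem.Dict.getD_foldl_modify_append, hch]
      have hJ : ∀ t, (parents t).foldl (fun (inner : PySem.Dict Int (List Int)) di => inner.insert di (((pyLinksAt linksPerTimestep t).foldl (fun (d : PySem.Dict Int (List Int)) q => d.modify q.1 [] (fun l => l ++ [q.2])) PySem.Dict.empty).getD di [])) PySem.Dict.empty = I t := by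
        intro t
        have : ∀ l : List Int, l.foldl (fun (inner : PySem.Dict Int (List Int)) di => inner.insert di (((pyLinksAt linksPerTimestep t).foldl (fun (d : PySem.Dict Int (List Int)) q => d.modify q.1 [] (fun l => l ++ [q.2])) PySem.Dict.empty).getD di [])) PySem.Dict.empty
            = l.foldl (fun inner di => inner.insert di (ch t di)) PySem.Dict.empty := by
          intro l
          congr 1
          funext inner di
          rw [hcbs]
        rw [this, hparents_eq, List.foldl_map]
        simp only [hI]
        exact List.foldl_filter
      have hbody : (fun (acc : PySem.Dict String (PySem.Dict Int (List Int))) t =>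
            if (parents t).isEmpty then acc
            else acc.insert t ((parents t).foldl (fun (inner : PySem.Dict Int (List Int)) di => inner.insert di (((pyLinksAt linksPerTimestep t).foldl (fun (d : PySem.Dict Int (List Int)) q => d.modify q.1 [] (fun l => l ++ [q.2])) PySem.Dict.empty).getD di [])) PySem.Dict.empty))
          = fun acc t => if !(parents t).isEmpty then acc.insert t (I t) else acc := by
        funext acc t
        rw [hJ]
        cases (parents t).isEmpty <;> simp
      rw [hbody]
      rw [pvTwoPass I (fun t => !(parents t).isEmpty)]
      intro t hP
      have hpe : parents t = [] := by
        cases hpe2 : (parents t).isEmpty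
        · simp [hpe2] at hP
        · exact List.isEmpty_iff.1 hpe2
      have hfil : divisions.filter (fun p => p.1 == (PySem.Int.ofStr? t).getD 0 - 1) = [] := by
        have := hparents_eq t
        rw [hpe] at this
        exact List.map_eq_nil_iff.1 this.symm
      simp only [hI]
      have hff : (divisions.filter (fun p => p.1 == (PySem.Int.ofStr? t).getD 0 - 1)).foldl (fun (inner : PySem.Dict Int (List Int)) p => inner.insert p.2 (ch t p.2)) PySem.Dict.empty
          = divisions.foldl (fun (inner : PySem.Dict Int (List Int)) p => if p.1 == (PySem.Int.ofStr? t).getD 0 - 1 then inner.insert p.2 (ch t p.2) else inner) PySem.Dict.empty := List.foldl_filter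
      rw [← hff, hfil]
      rfl
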